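-- pv_equiv track=rewrite | github.com/duhines/CC-Mission-2 | markovImages.py | determine_start
-- ===== SOURCE A (Python) =====
-- def determine_start(input_pixels):
-- 	"""
-- 	Purpose: Choose a starting pixel value based off the input image by adding up
-- 		     all the R, G, and B values and then using modulo division on all these
-- 		     values to get them back in the range of a real pixel.
--     Input: List of pixel values where each pixel value is a list of the R, G, and B
--     	   Values.
--    	Return: A list of the starting R, G, and B values.
--    	"""
-- 	red_sum = 0
-- 	blue_sum = 0
-- 	green_sum = 0
--
-- 	for pixel in input_pixels:
-- 		red_sum += pixel[0]
-- 		green_sum += pixel[1]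
-- 		blue_sum += pixel[2]
--
-- 	start = [red_sum % 255, green_sum % 255, blue_sum % 255]
-- 	return start #start with a pixel of this color
-- ===== SOURCE B (Python) =====
-- def determine_start(input_pixels):
--     # Divide-and-conquer: each half yields per-channel residues mod 255,
--     # combined with a modular addition (mod 255 is a homomorphism on sums).
--     def solve(px):
--         n = len(px)
--         if n == 0:
--             return (0, 0, 0)
--         if n == 1:
--             p = px[0]
--             return (p[0] % 255, p[1] % 255, p[2] % 255)
--         mid = n // 2
--         r1, g1, b1 = solve(px[:mid])
--         r2, g2, b2 = solve(px[mid:])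
--         return ((r1 + r2) % 255, (g1 + g2) % 255, (b1 + b2) % 255)
--     r, g, b = solve(input_pixels)
--     return [r, g, b]
-- ===== Notes on version B (the rewrite author's own statement) =====
-- stated objective: alternative
-- what changed: Replaces A's single accumulating pass with a final mod by a divide-and-conquer recursion that splits the list in halves and combines per-channel residues with modular addition (mod 255 is a homomorphism), keeping all intermediate values in [0,255).
import Mathlib
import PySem

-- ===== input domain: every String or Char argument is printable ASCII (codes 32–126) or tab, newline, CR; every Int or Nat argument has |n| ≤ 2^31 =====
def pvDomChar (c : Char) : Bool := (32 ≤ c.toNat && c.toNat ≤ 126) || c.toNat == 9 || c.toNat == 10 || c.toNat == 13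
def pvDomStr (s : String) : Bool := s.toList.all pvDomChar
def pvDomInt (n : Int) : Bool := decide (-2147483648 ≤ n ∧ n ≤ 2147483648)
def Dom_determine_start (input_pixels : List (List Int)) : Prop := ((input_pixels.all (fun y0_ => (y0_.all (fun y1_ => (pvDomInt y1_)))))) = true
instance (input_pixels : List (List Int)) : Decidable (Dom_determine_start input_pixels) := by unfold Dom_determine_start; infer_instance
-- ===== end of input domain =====

-- B replaces A's single accumulating pass (mod at the end) by a divide-and-conquer
-- recursion combining per-channel residues mod 255 (same O(n) cost, different algorithm).

-- ===== PORT A =====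
-- one pass with three accumulators; pyGetD is exact under Pre_ (every pixel has ≥ 3 channels)
def determine_start (input_pixels : List (List Int)) : List Int :=
  let s := input_pixels.foldl
    (fun (acc : Int × Int × Int) pixel =>
      (acc.1 + PySem.List.pyGetD pixel 0 0,
       acc.2.1 + PySem.List.pyGetD pixel 1 0,
       acc.2.2 + PySem.List.pyGetD pixel 2 0))
    (0, 0, 0)
  [PySem.Int.mod s.1 255, PySem.Int.mod s.2.1 255, PySem.Int.mod s.2.2 255]

-- ===== PORT B =====
-- Source B's solve: split at mid = n // 2 (Nat division = Python // on the nonnegative length;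
-- px[:mid] = px.take mid and px[mid:] = px.drop mid by PySem.List.slice_to_natCast / slice_from_natCast)
def dsSolve (px : List (List Int)) : Int × Int × Int :=
  if _ : px.length = 0 then (0, 0, 0)
  else if _ : px.length = 1 then
    let p := PySem.List.pyGetD px 0 []
    (PySem.Int.mod (PySem.List.pyGetD p 0 0) 255,
     PySem.Int.mod (PySem.List.pyGetD p 1 0) 255,
     PySem.Int.mod (PySem.List.pyGetD p 2 0) 255)
  else
    let mid := px.length / 2
    let a := dsSolve (px.take mid)
    let b := dsSolve (px.drop mid)
    (PySem.Int.mod (a.1 + b.1) 255,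
     PySem.Int.mod (a.2.1 + b.2.1) 255,
     PySem.Int.mod (a.2.2 + b.2.2) 255)
termination_by px.length
decreasing_by
  · simp only [List.length_take]; omega
  · simp only [List.length_drop]; omega

def determine_start_alt (input_pixels : List (List Int)) : List Int :=
  let s := dsSolve input_pixels
  [s.1, s.2.1, s.2.2]

-- ===== PRECONDITION & SPEC =====
-- Pre_ excludes pixels with fewer than 3 channels, on which both A and B raise IndexError.
def Pre_determine_start (input_pixels : List (List Int)) : Prop :=
  (input_pixels.all (fun p => decide (3 ≤ p.length))) = true
instance (input_pixels : List (List Int)) : Decidable (Pre_determine_start input_pixels) := by unfold Pre_determine_start; infer_instance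
def pvWitness_determine_start : List (List Int) := [[10, 20, 30], [250, 1, 2]]

def Spec_determine_start (input_pixels : List (List Int)) (out : List Int) : Prop := out = determine_start_alt input_pixels
instance (input_pixels : List (List Int)) (out : List Int) : Decidable (Spec_determine_start input_pixels out) := by unfold Spec_determine_start; infer_instance

-- ===== CLAIM =====
def Claim_equal_determine_start : Prop := ∀ (input_pixels : List (List Int)), Dom_determine_start input_pixels → Pre_determine_start input_pixels → Spec_determine_start input_pixels (determine_start input_pixels)

-- ===== LEMMAS AND PROOFS =====
-- channel sum of a pixel list
def chSum (i : Int) (px : List (List Int)) : Int :=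
  (px.map (fun p => PySem.List.pyGetD p i 0)).sum

theorem chSum_append (i : Int) (xs ys : List (List Int)) :
    chSum i (xs ++ ys) = chSum i xs + chSum i ys := by
  simp [chSum]

theorem mod_add_mod255 (a b : Int) :
    PySem.Int.mod (PySem.Int.mod a 255 + PySem.Int.mod b 255) 255 = PySem.Int.mod (a + b) 255 := by
  simp only [PySem.Int.mod_eq_emod_of_pos (a := a) (b := (255:Int)) (by norm_num),
             PySem.Int.mod_eq_emod_of_pos (a := b) (b := (255:Int)) (by norm_num),
             PySem.Int.mod_eq_emod_of_pos (b := (255:Int)) (by norm_num)]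
  exact (Int.add_emod a b 255).symm

-- dsSolve computes exactly the three channel sums mod 255
theorem dsSolve_eq (px : List (List Int)) :
    dsSolve px = (PySem.Int.mod (chSum 0 px) 255,
                  PySem.Int.mod (chSum 1 px) 255,
                  PySem.Int.mod (chSum 2 px) 255) := by
  fun_induction dsSolve px with
  | case1 px h0 =>
      have : px = [] := List.length_eq_zero_iff.mp h0
      subst this; simp [chSum, PySem.Int.mod]
  | case2 px h0 h1 =>
      obtain ⟨p, rfl⟩ := List.length_eq_one_iff.mp h1
      rename_i q
      rw [show q = p from rfl]
      simp [chSum, PySem.List.pyGetD, PySem.List.pyGet?, PySem.List.pyIdx?]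
  | case3 px h0 h1 mid a b ih1 ih2 =>
      have hsplit : px = px.take (px.length / 2) ++ px.drop (px.length / 2) :=
        (List.take_append_drop _ _).symm
      rw [show a = dsSolve (px.take (px.length / 2)) from rfl,
          show b = dsSolve (px.drop (px.length / 2)) from rfl, ih1, ih2]
      simp only [mod_add_mod255]
      rw [← chSum_append, ← chSum_append, ← chSum_append, ← hsplit]

theorem ds_foldl_eq (xs : List (List Int)) (r g b : Int) :
    xs.foldl
      (fun (acc : Int × Int × Int) pixel =>
        (acc.1 + PySem.List.pyGetD pixel 0 0,
         acc.2.1 + PySem.List.pyGetD pixel 1 0,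
         acc.2.2 + PySem.List.pyGetD pixel 2 0)) (r, g, b)
    = (r + chSum 0 xs, g + chSum 1 xs, b + chSum 2 xs) := by
  induction xs generalizing r g b with
  | nil => simp [chSum]
  | cons x xs ih => simp [List.foldl, ih, chSum]; ring_nf; simp

-- ===== VERDICT =====
theorem determine_start_spec : Claim_equal_determine_start := by
  intro xs _ _
  unfold Spec_determine_start determine_start determine_start_alt
  simp [ds_foldl_eq, dsSolve_eq]
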